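-- pv_equiv track=rewrite | github.com/Wet-panties/test | 1111.py | sum_numb
-- ===== SOURCE A (Python) =====
-- def sum_numb(list_to_sum: list, sign: str, list_to_sum2: list) -> int or float:
--     """
--     Функция в зависимости от введенного знака
--     будет считать положительные или отрицательные значения списка
--     """
--     if sign == '+':
--         if len(list_to_sum) == 0:
--             return sum(list_to_sum2)
--         elif list_to_sum[0] < 0:
--             list_to_sum.pop(0)
--             return sum_numb(list_to_sum, sign, list_to_sum2)
--         else:
--             list_to_sum2.append(list_to_sum[0])
--             list_to_sum.pop(0)
--             return sum_numb(list_to_sum, sign, list_to_sum2)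
--     if sign == '-':
--         if len(list_to_sum) == 0:
--             return sum(list_to_sum2)
--         elif list_to_sum[0] > 0:
--             list_to_sum.pop(0)
--             return sum_numb(list_to_sum, sign, list_to_sum2)
--         else:
--             list_to_sum2.append(list_to_sum[0])
--             list_to_sum.pop(0)
--             return sum_numb(list_to_sum, sign, list_to_sum2)
-- ===== SOURCE B (Python) =====
-- def sum_numb(list_to_sum: list, sign: str, list_to_sum2: list) -> int or float:
--     if sign == '+':
--         return sum(list_to_sum2) + sum(x for x in list_to_sum if x >= 0)
--     if sign == '-':
--         return sum(list_to_sum2) + sum(x for x in list_to_sum if x <= 0)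
-- ===== Notes on version B (the rewrite author's own statement) =====
-- stated objective: simpler
-- what changed: Replaces A's recursion that pops the head of list1 and appends non-filtered elements to list2 by a single non-mutating linear pass: sum(list2) plus the sum of the filtered elements of list1.
-- outside the precondition, e.g. on sum_numb([1], 'x', [2]): A returns None, B returns None
import Mathlib
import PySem

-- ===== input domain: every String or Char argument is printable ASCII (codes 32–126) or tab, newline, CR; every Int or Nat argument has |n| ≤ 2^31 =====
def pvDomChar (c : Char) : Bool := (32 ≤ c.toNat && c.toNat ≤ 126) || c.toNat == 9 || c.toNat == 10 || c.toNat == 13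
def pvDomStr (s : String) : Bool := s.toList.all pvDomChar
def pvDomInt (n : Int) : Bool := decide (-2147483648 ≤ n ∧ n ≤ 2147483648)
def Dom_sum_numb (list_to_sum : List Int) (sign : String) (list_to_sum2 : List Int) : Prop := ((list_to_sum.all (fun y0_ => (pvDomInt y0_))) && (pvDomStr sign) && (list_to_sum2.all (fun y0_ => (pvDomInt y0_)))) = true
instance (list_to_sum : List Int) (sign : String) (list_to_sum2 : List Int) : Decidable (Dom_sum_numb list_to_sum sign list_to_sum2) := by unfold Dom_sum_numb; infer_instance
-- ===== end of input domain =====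

-- B replaces A's head-popping recursion (which mutates both list arguments in place)
-- by a single non-mutating pass: sum(list2) + sum of filtered elements; the equivalence
-- proved is about the return value only (A's in-place mutation is not reproduced).


-- ===== PORT A =====
-- A recurses: pops the head of list_to_sum, possibly appends it to list_to_sum2,
-- and at the end returns sum(list_to_sum2). For a sign other than '+'/'-' Python
-- falls off the end returning None (excluded by Pre_); 0 is a placeholder there.
def sum_numb (list_to_sum : List Int) (sign : String) (list_to_sum2 : List Int) : Int :=
  if sign = "+" then
    match list_to_sum with
    | [] => list_to_sum2.sum
    | x :: rest =>
      if x < 0 then sum_numb rest sign list_to_sum2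
      else sum_numb rest sign (list_to_sum2 ++ [x])
  else if sign = "-" then
    match list_to_sum with
    | [] => list_to_sum2.sum
    | x :: rest =>
      if x > 0 then sum_numb rest sign list_to_sum2
      else sum_numb rest sign (list_to_sum2 ++ [x])
  else 0

-- ===== PORT B =====
def sum_numb_alt (list_to_sum : List Int) (sign : String) (list_to_sum2 : List Int) : Int :=
  if sign = "+" then list_to_sum2.sum + (list_to_sum.filter (fun x => 0 ≤ x)).sum
  else if sign = "-" then list_to_sum2.sum + (list_to_sum.filter (fun x => x ≤ 0)).sum
  else 0

-- ===== PRECONDITION & SPEC =====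
-- Pre_ excludes signs other than '+'/'-', on which Python A returns None, not an int.
def Pre_sum_numb (list_to_sum : List Int) (sign : String) (list_to_sum2 : List Int) : Prop :=
  sign = "+" ∨ sign = "-"
instance (list_to_sum : List Int) (sign : String) (list_to_sum2 : List Int) : Decidable (Pre_sum_numb list_to_sum sign list_to_sum2) := by unfold Pre_sum_numb; infer_instance
def pvWitness_sum_numb : List Int × String × List Int := ([1, -2, 3], "+", [10])
def Spec_sum_numb (list_to_sum : List Int) (sign : String) (list_to_sum2 : List Int) (out : Int) : Prop := out = sum_numb_alt list_to_sum sign list_to_sum2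
instance (list_to_sum : List Int) (sign : String) (list_to_sum2 : List Int) (out : Int) : Decidable (Spec_sum_numb list_to_sum sign list_to_sum2 out) := by unfold Spec_sum_numb; infer_instance

-- ===== CLAIM (what is proved, stated in full; the proofs are below) =====
def Claim_equal_sum_numb : Prop := ∀ (list_to_sum : List Int) (sign : String) (list_to_sum2 : List Int), Dom_sum_numb list_to_sum sign list_to_sum2 → Pre_sum_numb list_to_sum sign list_to_sum2 → Spec_sum_numb list_to_sum sign list_to_sum2 (sum_numb list_to_sum sign list_to_sum2)

-- ===== LEMMAS AND PROOFS =====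
theorem sum_numb_plus (l : List Int) (l2 : List Int) :
    sum_numb l "+" l2 = l2.sum + (l.filter (fun x => 0 ≤ x)).sum := by
  induction l generalizing l2 with
  | nil => simp [sum_numb]
  | cons x rest ih =>
    simp only [sum_numb, if_pos rfl, List.filter_cons]
    by_cases h : x < 0
    · rw [if_pos h, ih]
      have : ¬ (0 ≤ x) := by omega
      simp [this]
    · rw [if_neg h, ih]
      have : (0 ≤ x) := by omega
      simp [this]
      ring
theorem sum_numb_minus (l : List Int) (l2 : List Int) :
    sum_numb l "-" l2 = l2.sum + (l.filter (fun x => x ≤ 0)).sum := by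
  induction l generalizing l2 with
  | nil => simp [sum_numb]
  | cons x rest ih =>
    simp only [sum_numb]
    rw [if_neg (by decide)]
    simp only [if_pos rfl, List.filter_cons]
    by_cases h : x > 0
    · rw [if_pos h, ih]
      have : ¬ (x ≤ 0) := by omega
      simp [this]
    · rw [if_neg h, ih]
      have : (x ≤ 0) := by omega
      simp [this]
      ring

-- ===== VERDICT (by name: the statement is the Claim_ definition above) =====
theorem sum_numb_spec : Claim_equal_sum_numb := by
  intro l sign l2 _ hpre
  unfold Spec_sum_numb sum_numb_alt
  rcases hpre with h | h <;> subst h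
  · rw [if_pos rfl, sum_numb_plus]
  · rw [if_neg (by decide), if_pos rfl, sum_numb_minus]
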